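-- pv_equiv track=rewrite | github.com/corygabrielsen/openavatar | contracts/scripts/python/image_data.py | checkerboard
-- ===== SOURCE A (Python) =====
-- from typing import List, Tuple
--
-- RGBA = Tuple[int, int, int, int]
--
-- def checkerboard(h: int, w: int) -> List[List[RGBA]]:
--     """
--     Generate a checkerboard pattern
--
--     :param h: height of the pattern
--     :param w: width of the pattern
--     :return: a list of lists of tuples of ints
--     """
--     data = []
--
--     for a in range(h):
--         row = []
--         for b in range(w):
--             val = a * w + b
--             val = val * 16 + val
--             val = val % 256
--             row.append((val, val, val, 255))
--         data.append(row)
--     return data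
-- ===== SOURCE B (Python) =====
-- from typing import List, Tuple
--
-- RGBA = Tuple[int, int, int, int]
--
-- def checkerboard(h: int, w: int) -> List[List[RGBA]]:
--     """A single generator streams the grey cells (v <- (v+17) % 256); each row takes w of them."""
--     def cells():
--         v = 0
--         while True:
--             yield (v, v, v, 255)
--             v = (v + 17) % 256
--     g = cells()
--     return [[next(g) for _ in range(w)] for _ in range(h)]
-- ===== Notes on version B (the rewrite author's own statement) =====
-- stated objective: alternative
-- what changed: Replaces the nested loops that recompute each cell's grey value from a closed form ((a*w+b)*16+(a*w+b)) % 256 by a single generator streaming a running grey value (v <- (v+17) % 256) from which each row takes w cells.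
import Mathlib
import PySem

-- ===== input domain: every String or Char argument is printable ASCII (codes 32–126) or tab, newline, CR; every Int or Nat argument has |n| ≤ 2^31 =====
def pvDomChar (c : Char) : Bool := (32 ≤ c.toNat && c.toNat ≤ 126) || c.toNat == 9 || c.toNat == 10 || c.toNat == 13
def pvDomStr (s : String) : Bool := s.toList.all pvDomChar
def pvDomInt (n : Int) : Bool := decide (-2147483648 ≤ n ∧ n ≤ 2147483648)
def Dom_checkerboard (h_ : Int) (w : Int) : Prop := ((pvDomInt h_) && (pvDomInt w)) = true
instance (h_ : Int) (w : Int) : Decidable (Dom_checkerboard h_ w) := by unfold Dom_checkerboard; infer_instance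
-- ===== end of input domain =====

-- B replaces the per-cell closed-form recomputation ((a*w+b) scaled then mod 256) by a
-- single generator streaming a running grey value (v ← (v+17) % 256) from which each
-- row takes w cells (objective: alternative).

-- ===== PORT A =====
def checkerboard (h_ : Int) (w : Int) : List (List (Int × Int × Int × Int)) :=
  (PySem.List.pyRange 0 h_ 1).foldl (fun data a =>
    data ++ [(PySem.List.pyRange 0 w 1).foldl (fun row b =>
      let val := a * w + b
      let val := val * 16 + val
      let val := PySem.Int.mod val 256
      row ++ [(val, val, val, 255)]) []]) []

-- ===== PORT B =====
-- the generator's state is the running value v: taking w cells from it is this fold,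
-- returning the row and the generator's new state
def altRow (w : Int) (v : Int) : List (Int × Int × Int × Int) × Int :=
  (PySem.List.pyRange 0 w 1).foldl
    (fun (st : List (Int × Int × Int × Int) × Int) _ =>
      (st.1 ++ [(st.2, st.2, st.2, 255)], PySem.Int.mod (st.2 + 17) 256)) ([], v)

def checkerboard_alt (h_ : Int) (w : Int) : List (List (Int × Int × Int × Int)) :=
  ((PySem.List.pyRange 0 h_ 1).foldl
    (fun (st : List (List (Int × Int × Int × Int)) × Int) _ =>
      let r := altRow w st.2
      (st.1 ++ [r.1], r.2)) ([], 0)).1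

-- ===== PRECONDITION & SPEC =====
def Spec_checkerboard (h_ : Int) (w : Int) (out : List (List (Int × Int × Int × Int))) : Prop := out = checkerboard_alt h_ w
instance (h_ : Int) (w : Int) (out : List (List (Int × Int × Int × Int))) : Decidable (Spec_checkerboard h_ w out) := by unfold Spec_checkerboard; infer_instance

-- ===== CLAIM (what is proved, stated in full; the proofs are below) =====
def Claim_equal_checkerboard : Prop := ∀ (h_ : Int) (w : Int), Dom_checkerboard h_ w → Spec_checkerboard h_ w (checkerboard h_ w)

-- ===== LEMMAS AND PROOFS =====

-- the RGBA cell for grey value v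
def pvCell (v : Int) : Int × Int × Int × Int := (v, v, v, 255)

-- the row fold in closed form: starting from a reduced value x % 256, taking n cells
-- yields the cells for the grey values (x+17k) % 256 and leaves the state (x+17n) % 256
theorem rowFold_eq (n : Nat) (x : Int) (acc : List (Int × Int × Int × Int)) :
    (List.range n).foldl
      (fun (st : List (Int × Int × Int × Int) × Int) _ =>
        (st.1 ++ [(st.2, st.2, st.2, (255 : Int))], PySem.Int.mod (st.2 + 17) 256))
      (acc, (x % 256 : Int))
    = (acc ++ (List.range n).map (fun k : Nat => pvCell ((x + 17 * (k : Int)) % 256)),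
       ((x + 17 * n) % 256 : Int)) := by
  induction n generalizing acc x with
  | zero => simp
  | succ m ih =>
    rw [List.range_succ, List.foldl_append, ih]
    simp only [List.foldl_cons, List.foldl_nil, List.append_assoc]
    rw [Prod.mk.injEq]
    refine ⟨by simp [pvCell], ?_⟩
    rw [PySem.Int.mod_eq_emod_of_pos (by norm_num)]
    push_cast
    omega

theorem altRow_eq (W : Nat) (x : Int) :
    altRow (W : Int) (x % 256) =
      ((List.range W).map (fun k : Nat => pvCell ((x + 17 * (k : Int)) % 256)),
       ((x + 17 * W) % 256 : Int)) := by
  unfold altRow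
  rw [PySem.List.pyRange_zero_nat, List.foldl_map, rowFold_eq W x []]
  simp

-- a non-positive width yields an empty row and leaves the generator state unchanged
theorem altRow_nonpos {w : Int} (hw : w ≤ 0) (v : Int) : altRow w v = ([], v) := by
  unfold altRow
  rw [PySem.List.pyRange_one_eq_nil hw]
  rfl

theorem rows_const {α : Type} (l : List α) (acc : List (List (Int × Int × Int × Int))) (v : Int) :
    l.foldl (fun (st : List (List (Int × Int × Int × Int)) × Int) _ =>
      (st.1 ++ [([] : List (Int × Int × Int × Int))], st.2)) (acc, v)
    = (acc ++ l.map (fun _ => []), v) := by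
  induction l generalizing acc with
  | nil => simp
  | cons y ys ih => simp [ih]

-- the outer fold in closed form (positive width W): after n rows the data holds the
-- first n rows of the pattern and the generator state is 17*(n*W) % 256
theorem outerFold_eq (W : Nat) (n : Nat) (x : Int) (acc : List (List (Int × Int × Int × Int))) :
    (List.range n).foldl
      (fun (st : List (List (Int × Int × Int × Int)) × Int) _ =>
        let r := altRow (W : Int) st.2
        (st.1 ++ [r.1], r.2)) (acc, (x % 256 : Int))
    = (acc ++ (List.range n).map (fun a : Nat =>
        (List.range W).map (fun b : Nat => pvCell ((x + 17 * ((a : Int) * W + (b : Int))) % 256))),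
       ((x + 17 * (n * W)) % 256 : Int)) := by
  induction n generalizing acc x with
  | zero => simp
  | succ m ih =>
    rw [List.range_succ, List.foldl_append, ih]
    simp only [List.foldl_cons, List.foldl_nil, List.append_assoc, altRow_eq W (x + 17 * (m * W))]
    rw [Prod.mk.injEq]
    constructor
    · simp only [List.map_append, List.map_singleton]
      congr 3
      refine List.map_congr_left fun b _ => ?_
      congr 2
      ring
    · congr 1
      push_cast
      ring

-- the outer fold started at 0, in the form the port produces
theorem outerFold_zero (W H : Nat) :
    (List.range H).foldl
      (fun (st : List (List (Int × Int × Int × Int)) × Int) _ =>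
        let r := altRow (W : Int) st.2
        (st.1 ++ [r.1], r.2)) ([], 0)
    = ((List.range H).map (fun a : Nat =>
        (List.range W).map (fun b : Nat => pvCell ((17 * ((a : Int) * W + (b : Int))) % 256))),
       ((17 * (H * W) : Int) % 256 : Int)) := by
  have h := outerFold_eq W H 0 []
  simpa using h

-- A as a nested map (both foldls append a singleton)
theorem checkerboard_eq_map (h_ w : Int) :
    checkerboard h_ w = (PySem.List.pyRange 0 h_ 1).map (fun a =>
      (PySem.List.pyRange 0 w 1).map (fun b =>
        pvCell (PySem.Int.mod ((a * w + b) * 16 + (a * w + b)) 256))) := by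
  unfold checkerboard
  rw [PySem.List.foldl_append_singleton_eq_map
    (fun a => (PySem.List.pyRange 0 w 1).foldl (fun row b =>
      let val := a * w + b
      let val := val * 16 + val
      let val := PySem.Int.mod val 256
      row ++ [(val, val, val, 255)]) [])]
  simp only [List.nil_append]
  refine List.map_congr_left (fun a _ => ?_)
  exact PySem.List.foldl_append_singleton_eq_map
    (fun b => pvCell (PySem.Int.mod ((a * w + b) * 16 + (a * w + b)) 256)) _ []

-- ===== VERDICT (by name: the statement is the Claim_ definition above) =====
theorem checkerboard_spec : Claim_equal_checkerboard := by
  intro h_ w _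
  unfold Spec_checkerboard checkerboard_alt
  rw [checkerboard_eq_map]
  by_cases hw : w ≤ 0
  · simp only [fun v => altRow_nonpos hw v]
    rw [PySem.List.pyRange_one_eq_nil hw]
    rw [rows_const (PySem.List.pyRange 0 h_ 1) [] 0]
    simp
  · by_cases hh : h_ ≤ 0
    · simp [PySem.List.pyRange_one_eq_nil hh]
    · push Not at hh hw
      obtain ⟨H, rfl⟩ : ∃ H : Nat, h_ = (H : Int) := ⟨h_.toNat, (Int.toNat_of_nonneg hh.le).symm⟩
      obtain ⟨W, rfl⟩ : ∃ W : Nat, w = (W : Int) := ⟨w.toNat, (Int.toNat_of_nonneg hw.le).symm⟩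
      rw [PySem.List.pyRange_zero_nat H, List.foldl_map, outerFold_zero W H, List.map_map]
      refine List.map_congr_left (fun a _ => ?_)
      simp only [Function.comp_apply]
      rw [PySem.List.pyRange_zero_nat W, List.map_map]
      refine List.map_congr_left (fun b _ => ?_)
      simp only [Function.comp_apply, PySem.Int.mod_eq_emod_of_pos (by norm_num : (0:Int) < 256)]
      congr 2
      ring
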